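-- pv_equiv track=rewrite | github.com/ubuntor/synacor_challenge | ack.py | blah
-- ===== SOURCE A (Python) =====
-- mask = 0x7fff
--
-- def blah(n, key):
--     if key == 0:
--         return n
--     res = 0
--     base = key+1
--     for i in range(n):
--         res = (res*base+1) & mask
--     return res
-- ===== SOURCE B (Python) =====
-- mask = 0x7fff
--
-- def blah(n, key):
--     # Fast doubling: res after k steps of res = (res*base+1) mod 2^15 is the
--     # geometric sum S_k = 1 + base + ... + base^(k-1) mod 2^15; compute
--     # (base^k, S_k) over the bits of n in O(log n).
--     if key == 0:
--         return n
--     b = (key + 1) & mask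
--
--     def go(k):  # returns (base^k mod 2^15, S_k mod 2^15)
--         if k <= 0:
--             return (1, 0)
--         p, s = go(k // 2)
--         p2 = (p * p) & mask
--         s2 = (s * (p + 1)) & mask
--         if k % 2:
--             return ((p2 * b) & mask, (s2 * b + 1) & mask)
--         return (p2, s2)
--
--     return go(n)[1]
-- ===== Notes on version B (the rewrite author's own statement) =====
-- stated objective: faster
-- what changed: Replaced the n-iteration linear-recurrence loop with fast doubling over the bits of n, computing (base^k mod 2^15, geometric-sum_k mod 2^15) pairs recursively on k//2.
import Mathlib
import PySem

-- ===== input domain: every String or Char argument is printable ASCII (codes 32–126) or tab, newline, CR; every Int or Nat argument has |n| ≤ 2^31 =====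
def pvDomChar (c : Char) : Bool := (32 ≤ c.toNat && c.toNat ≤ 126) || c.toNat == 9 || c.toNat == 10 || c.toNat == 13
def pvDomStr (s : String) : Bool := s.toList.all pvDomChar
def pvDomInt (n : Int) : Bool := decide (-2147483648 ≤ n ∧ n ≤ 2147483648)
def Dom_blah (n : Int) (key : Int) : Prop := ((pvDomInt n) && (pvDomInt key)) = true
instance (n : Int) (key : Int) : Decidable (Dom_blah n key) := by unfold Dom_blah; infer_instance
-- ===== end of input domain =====

-- B replaces A's O(n) loop by O(log n) fast doubling of the affine step modulo 2^15.
-- Python's `x & 0x7fff` on an int is two's-complement bitwise and: exactly Int.land x 32767.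

-- ===== PORT A =====
-- the `for i in range(n)` loop: res := (res*base+1) & 0x7fff, n.toNat times
def blahLoop (base : Int) (res : Int) : Nat → Int
  | 0 => res
  | k + 1 => blahLoop base (Int.land (res * base + 1) 32767) k

def blah (n : Int) (key : Int) : Int :=
  if key = 0 then n
  else blahLoop (key + 1) 0 n.toNat

-- ===== PORT B =====
-- go(k) of Source B: returns (base^k & 0x7fff, S_k & 0x7fff), recursing on k // 2
def blahGo (b : Int) (k : Nat) : Int × Int :=
  if h : k = 0 then (1, 0)
  else
    let ps := blahGo b (k / 2)
    let p2 := Int.land (ps.1 * ps.1) 32767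
    let s2 := Int.land (ps.2 * (ps.1 + 1)) 32767
    if k % 2 = 1 then (Int.land (p2 * b) 32767, Int.land (s2 * b + 1) 32767)
    else (p2, s2)
termination_by k
decreasing_by omega

def blah_alt (n : Int) (key : Int) : Int :=
  if key = 0 then n
  else (blahGo (Int.land (key + 1) 32767) n.toNat).2

-- ===== PRECONDITION & SPEC =====
def Spec_blah (n : Int) (key : Int) (out : Int) : Prop := out = blah_alt n key
instance (n : Int) (key : Int) (out : Int) : Decidable (Spec_blah n key out) := by unfold Spec_blah; infer_instance

-- ===== CLAIM (what is proved, stated in full; the proofs are below) =====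
def Claim_equal_blah : Prop := ∀ (n : Int) (key : Int), Dom_blah n key → Spec_blah n key (blah n key)

-- ===== LEMMAS AND PROOFS =====

-- peel the LAST iteration off the forward loop
theorem blahLoop_last (b : Int) (k : Nat) : ∀ res : Int,
    blahLoop b res (k + 1) = Int.land (blahLoop b res k * b + 1) 32767 := by
  induction k with
  | zero => intro res; rfl
  | succ k ih =>
      intro res
      rw [show blahLoop b res (k + 1 + 1) = blahLoop b (Int.land (res * b + 1) 32767) (k + 1) from rfl,
        ih, show blahLoop b res (k + 1) = blahLoop b (Int.land (res * b + 1) 32767) k from rfl]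

-- Python's `& 0x7fff` is reduction modulo 2^15
theorem nat_ldiff_mask (m : Nat) : Nat.ldiff 32767 m = 32767 - m % 32768 := by
  apply Nat.eq_of_testBit_eq
  intro k
  rw [Nat.testBit_ldiff]
  have h : (32767 : Nat) - m % 32768 = 2 ^ 15 - (m % 32768 + 1) := by omega
  rw [h, Nat.testBit_two_pow_sub_succ (by omega : m % 32768 < 2 ^ 15)]
  rw [show (32768 : Nat) = 2 ^ 15 from rfl, Nat.testBit_mod_two_pow]
  rw [show (32767 : Nat) = 2 ^ 15 - 1 from rfl, Nat.testBit_two_pow_sub_one]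
  cases Nat.decLt k 15 with
  | isTrue h' => simp [h']
  | isFalse h' => simp [h']

theorem land_mask (x : Int) : Int.land x 32767 = x % 32768 := by
  cases x with
  | ofNat m =>
      show (↑(m &&& 32767) : Int) = ↑m % 32768
      have h := Nat.and_two_pow_sub_one_eq_mod m 15
      norm_num at h
      rw [h]
      omega
  | negSucc m =>
      show (↑(Nat.ldiff 32767 m) : Int) = Int.negSucc m % 32768
      rw [nat_ldiff_mask, Int.negSucc_eq]
      omega

theorem blahLoop_range (b : Int) (k : Nat) :
    0 ≤ blahLoop b 0 k ∧ blahLoop b 0 k < 32768 := by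
  cases k with
  | zero => simp [blahLoop]
  | succ k =>
      rw [blahLoop_last, land_mask]
      exact ⟨Int.emod_nonneg _ (by norm_num), Int.emod_lt_of_pos _ (by norm_num)⟩

theorem blahLoop_emod (b : Int) (k : Nat) : blahLoop b 0 k % 32768 = blahLoop b 0 k :=
  Int.emod_eq_of_lt (blahLoop_range b k).1 (blahLoop_range b k).2

-- composition of runs: the loop is affine, so j+k steps = k steps applied to the j-step result
theorem blahLoop_comp (b : Int) (j k : Nat) :
    blahLoop b 0 (j + k) = (b ^ k * blahLoop b 0 j + blahLoop b 0 k) % 32768 := by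
  induction k with
  | zero => simp [blahLoop, blahLoop_emod]
  | succ k ih =>
      rw [show j + (k + 1) = (j + k) + 1 from rfl, blahLoop_last, land_mask, ih,
        blahLoop_last, land_mask]
      conv_lhs => rw [Int.add_emod, Int.mul_emod, Int.emod_emod_of_dvd _ (by norm_num),
        ← Int.mul_emod, ← Int.add_emod]
      conv_rhs => rw [Int.add_emod, Int.emod_emod_of_dvd _ (by norm_num), ← Int.add_emod]
      ring_nf

theorem blahGo_spec (b : Int) (k : Nat) :
    (blahGo (b % 32768) k).1 = b ^ k % 32768 ∧ (blahGo (b % 32768) k).2 = blahLoop b 0 k := by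
  induction k using Nat.strong_induction_on with
  | _ k ih =>
    by_cases h : k = 0
    · subst h
      simp [blahGo, blahLoop]
    · obtain ⟨h1, h2⟩ := ih (k / 2) (by omega)
      have hk : k / 2 + k / 2 + k % 2 = k := by omega
      have hp2 : Int.land ((blahGo (b % 32768) (k / 2)).1 * (blahGo (b % 32768) (k / 2)).1) 32767
          = b ^ (k / 2 + k / 2) % 32768 := by
        rw [land_mask, h1, pow_add]
        conv_rhs => rw [Int.mul_emod]
      have hs2 : Int.land ((blahGo (b % 32768) (k / 2)).2 * ((blahGo (b % 32768) (k / 2)).1 + 1)) 32767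
          = blahLoop b 0 (k / 2 + k / 2) := by
        rw [land_mask, h1, h2, blahLoop_comp b (k / 2) (k / 2)]
        conv_lhs => rw [Int.mul_emod, Int.add_emod (b ^ (k/2) % 32768),
          Int.emod_emod_of_dvd _ (by norm_num : (32768:Int) ∣ 32768), ← Int.add_emod,
          ← Int.mul_emod]
        ring_nf
      rw [blahGo]
      simp only [h, dite_false]
      by_cases hodd : k % 2 = 1
      · simp only [hodd, if_true]
        constructor
        · show Int.land (Int.land _ 32767 * (b % 32768)) 32767 = _
          rw [hp2, land_mask]
          have : b ^ k = b ^ (k / 2 + k / 2) * b := by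
            rw [← pow_succ]; congr 1; omega
          rw [this, Int.mul_emod, Int.emod_emod_of_dvd _ (by norm_num),
            Int.emod_emod_of_dvd _ (by norm_num), ← Int.mul_emod]
        · show Int.land (Int.land _ 32767 * (b % 32768) + 1) 32767 = _
          rw [hs2, land_mask]
          have hk1 : k = (k / 2 + k / 2) + 1 := by omega
          conv_rhs => rw [hk1, blahLoop_last, land_mask, Int.add_emod, Int.mul_emod, blahLoop_emod]
          rw [← Int.add_emod]
      · have heven : k = k / 2 + k / 2 := by omega
        simp only [hodd, if_false]
        refine ⟨?_, ?_⟩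
        · show Int.land _ 32767 = _
          rw [hp2, ← heven]
        · show Int.land _ 32767 = _
          rw [hs2, ← heven]

-- ===== VERDICT (by name: the statement is the Claim_ definition above) =====
theorem blah_spec : Claim_equal_blah := by
  intro n key _
  unfold Spec_blah blah blah_alt
  by_cases h : key = 0
  · simp [h]
  · simp only [h, if_false]
    rw [land_mask]
    exact ((blahGo_spec (key + 1) n.toNat).2).symm
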